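-- pv_equiv track=rewrite | github.com/laserkelvin/rotconML | src/models/predict_model.py | bracket_balancer
-- ===== SOURCE A (Python) =====
-- def bracket_balancer(smi: str) -> str:
--     """
--     Function that attempts to balance brackets. The logic
--     is not currently perfect as there is still a possibility
--     for hanging brackets, albeit this significantly cleans
--     most of them up.
--
--     Parameters
--     ----------
--     smi : str
--         Input SMILES string
--
--     Returns
--     -------
--     str
--         Cleaned SMILES string
--     """
--     temp = [char for char in smi]
--     queue = list()
--     for index, char in enumerate(temp):
--         if char in ["(", "["]:
--             queue.append(char)
--             continue
--         # if a closing bracket is found, check if its counterpart is in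
--         # the queue; if not, it means this is a hanging. If it does exist,
--         # remove it from the queue.
--         if char == ")":
--             if "(" in queue:
--                 queue.remove("(")
--             else:
--                 temp.pop(index)
--             continue
--         if char == "]":
--             if "[" in queue:
--                 queue.remove("[")
--             else:
--                 temp.pop(index)
--             continue
--     # Clear remaining hanging brackets
--     for char in queue:
--         temp.remove(char)
--     return "".join(temp)
-- ===== SOURCE B (Python) =====
-- def bracket_balancer(smi: str) -> str:
--     # One pass dropping hanging closing brackets while counting open ones,
--     # then one pass stripping the leftover unmatched open brackets.
--     kept = []
--     open_paren = open_square = 0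
--     for ch in smi:
--         if ch == "(":
--             open_paren += 1
--         elif ch == "[":
--             open_square += 1
--         elif ch == ")":
--             if open_paren == 0:
--                 continue
--             open_paren -= 1
--         elif ch == "]":
--             if open_square == 0:
--                 continue
--             open_square -= 1
--         kept.append(ch)
--     out = []
--     for ch in kept:
--         if ch == "(" and open_paren:
--             open_paren -= 1
--             continue
--         if ch == "[" and open_square:
--             open_square -= 1
--             continue
--         out.append(ch)
--     return "".join(out)
-- ===== Notes on version B (the rewrite author's own statement) =====
-- stated objective: alternative
-- what changed: Replaced A's mutate-while-enumerating scheme (live list popped during enumerate, a queue searched and removed from linearly, then one remove-scan per leftover queue entry) by a single counter pass that drops hanging closers followed by one pass stripping the unmatched openers.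
-- intended difference: On strings with a hanging closing bracket immediately followed by another bracket character, A's pop-during-enumerate skips that next bracket so it stays in the output unprocessed and uncounted (A(')(') = '('), while B simply drops the hanging closer and balances the rest (B(')(') = ''), which is the intended cleanup. — e.g. on bracket_balancer(")("): A returns "(", B returns ""
import Mathlib
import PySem

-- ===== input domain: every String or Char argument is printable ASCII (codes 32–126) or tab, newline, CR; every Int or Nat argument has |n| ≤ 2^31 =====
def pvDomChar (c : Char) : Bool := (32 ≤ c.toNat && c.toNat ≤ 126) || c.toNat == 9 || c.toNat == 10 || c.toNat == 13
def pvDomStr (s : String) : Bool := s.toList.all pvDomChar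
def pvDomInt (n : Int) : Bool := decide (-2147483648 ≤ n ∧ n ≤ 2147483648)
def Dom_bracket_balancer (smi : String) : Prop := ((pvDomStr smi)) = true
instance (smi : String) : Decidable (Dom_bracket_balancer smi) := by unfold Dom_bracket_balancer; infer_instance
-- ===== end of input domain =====

-- B replaces A's mutate-while-enumerating scheme (live list popped during enumerate, queue
-- searches, one remove-scan per leftover queue entry) by one counter pass dropping hanging
-- closers plus one pass stripping unmatched openers (objective: alternative); where A's pop skips
-- the character after a dropped closer, B intentionally differs (see D_ below).

-- ===== PORT A =====
-- list.remove(c): removes the first occurrence; in A the element is always present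
-- at every call site (checked by the preceding membership test / loop invariant),
-- so the `.getD t` default for the impossible ValueError is never taken.
def pyRemove (t : List Char) (c : Char) : List Char :=
  (PySem.List.remove? t c).getD t

-- the `for index, char in enumerate(temp)` loop over the live, mutated list `temp`:
-- Python's iterator reads temp[index] afresh each step, so popping at `index`
-- shifts the next element into `index` and it is skipped.
def loopA (temp : List Char) (i : Nat) (queue : List Char) : List Char × List Char :=
  if h : i < temp.length then
    let c := temp[i]
    if c = '(' ∨ c = '[' then loopA temp (i+1) (queue ++ [c])
    else if c = ')' then
      if '(' ∈ queue then loopA temp (i+1) (pyRemove queue '(')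
      else loopA (temp.eraseIdx i) (i+1) queue
    else if c = ']' then
      if '[' ∈ queue then loopA temp (i+1) (pyRemove queue '[')
      else loopA (temp.eraseIdx i) (i+1) queue
    else loopA temp (i+1) queue
  else (temp, queue)
termination_by temp.length - i
decreasing_by all_goals first | omega | (rw [List.length_eraseIdx_of_lt h]; omega)

def bracket_balancer (smi : String) : String :=
  let r := loopA smi.toList 0 []
  String.ofList (r.2.foldl pyRemove r.1)

-- ===== PORT B =====
-- state (open_paren, open_square, kept) of Source B's first for-loop
def stepB (st : Nat × Nat × List Char) (c : Char) : Nat × Nat × List Char :=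
  let (po, pb, kept) := st
  if c = '(' then (po + 1, pb, kept ++ [c])
  else if c = '[' then (po, pb + 1, kept ++ [c])
  else if c = ')' then
    if po = 0 then (po, pb, kept) else (po - 1, pb, kept ++ [c])
  else if c = ']' then
    if pb = 0 then (po, pb, kept) else (po, pb - 1, kept ++ [c])
  else (po, pb, kept ++ [c])

-- state (open_paren, open_square, out) of Source B's second for-loop
def stepStrip (st : Nat × Nat × List Char) (c : Char) : Nat × Nat × List Char :=
  let (po, pb, out) := st
  if c = '(' ∧ po > 0 then (po - 1, pb, out)
  else if c = '[' ∧ pb > 0 then (po, pb - 1, out)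
  else (po, pb, out ++ [c])

def bracket_balancer_alt (smi : String) : String :=
  let s := smi.toList.foldl stepB (0, 0, [])
  let r := s.2.2.foldl stepStrip (s.1, s.2.1, [])
  String.ofList r.2.2

-- ===== PRECONDITION & SPEC =====
-- On strings with a hanging closing bracket immediately followed by another bracket
-- character, A's pop-during-enumerate skips that next bracket so it stays in the output
-- unprocessed and uncounted (A ")(" = "("), while B simply drops the hanging closer and
-- balances the rest (B ")(" = ""), which is the intended cleanup.
def isBr (c : Char) : Bool := c ∈ [')', ']', '(', '[']

-- does the string hang a `b` closer (open bracket `a`) whose next character is a bracket?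
def hangNext (a b : Char) : List Char → Nat → Bool
  | [], _ => false
  | c :: cs, o =>
    if c = a then hangNext a b cs (o + 1)
    else if c = b then
      if 0 < o then hangNext a b cs (o - 1)
      else cs.head?.any isBr || hangNext a b cs o
    else hangNext a b cs o

def D_bracket_balancer (smi : String) : Prop :=
  (hangNext '(' ')' smi.toList 0 || hangNext '[' ']' smi.toList 0) = true
instance (smi : String) : Decidable (D_bracket_balancer smi) := by unfold D_bracket_balancer; infer_instance

def Spec_bracket_balancer (smi : String) (out : String) : Prop := ¬ D_bracket_balancer smi → out = bracket_balancer_alt smi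
instance (smi : String) (out : String) : Decidable (Spec_bracket_balancer smi out) := by unfold Spec_bracket_balancer; infer_instance

def pvDiffWitness_bracket_balancer : String := ")("
def pvDiffWitnessOut_bracket_balancer : String × String := ("(", "")

-- ===== CLAIM (what is proved, stated in full; the proofs are below) =====
def Claim_unchanged_bracket_balancer : Prop := ∀ (smi : String), Dom_bracket_balancer smi → Spec_bracket_balancer smi (bracket_balancer smi)
def Claim_changed_bracket_balancer : Prop := Dom_bracket_balancer (pvDiffWitness_bracket_balancer) ∧ D_bracket_balancer (pvDiffWitness_bracket_balancer) ∧ bracket_balancer (pvDiffWitness_bracket_balancer) = pvDiffWitnessOut_bracket_balancer.1 ∧ bracket_balancer_alt (pvDiffWitness_bracket_balancer) = pvDiffWitnessOut_bracket_balancer.2 ∧ pvDiffWitnessOut_bracket_balancer.1 ≠ pvDiffWitnessOut_bracket_balancer.2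

-- ===== LEMMAS AND PROOFS =====

-- the two single-type scans of D_ fused into one two-counter scan (proof-side only)
def hasBadAux : List Char → Nat → Nat → Bool
  | [], _, _ => false
  | c :: cs, po, pb =>
    if c = '(' then hasBadAux cs (po + 1) pb
    else if c = '[' then hasBadAux cs po (pb + 1)
    else if c = ')' then
      if po > 0 then hasBadAux cs (po - 1) pb
      else cs.head?.any isBr || hasBadAux cs po pb
    else if c = ']' then
      if pb > 0 then hasBadAux cs po (pb - 1)
      else cs.head?.any isBr || hasBadAux cs po pb
    else hasBadAux cs po pb

lemma hasBadAux_eq (l : List Char) : ∀ po pb,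
    hasBadAux l po pb = (hangNext '(' ')' l po || hangNext '[' ']' l pb) := by
  induction l with
  | nil => intro po pb; rfl
  | cons c cs ih =>
    intro po pb
    by_cases h1 : c = '('
    · subst h1
      rw [hasBadAux, hangNext, hangNext]
      simp only [Char.reduceEq, reduceIte]
      exact ih _ _
    · by_cases h2 : c = '['
      · subst h2
        rw [hasBadAux, hangNext, hangNext]
        simp only [Char.reduceEq, reduceIte]
        exact ih _ _
      · by_cases h3 : c = ')'
        · subst h3
          rw [hasBadAux, hangNext, hangNext]
          simp only [Char.reduceEq, reduceIte]
          by_cases hpo : po > 0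
          · rw [if_pos hpo, if_pos hpo, ih]
          · rw [if_neg hpo, if_neg hpo, ih]
            simp [Bool.or_assoc]
        · by_cases h4 : c = ']'
          · subst h4
            rw [hasBadAux, hangNext, hangNext]
            simp only [Char.reduceEq, reduceIte]
            by_cases hpb : pb > 0
            · rw [if_pos hpb, if_pos hpb, ih]
            · rw [if_neg hpb, if_neg hpb, ih]
              cases cs.head?.any isBr <;> cases hangNext '(' ')' cs po <;> simp
          · rw [hasBadAux, hangNext, hangNext]
            simp only [h1, h2, h3, h4, reduceIte]
            exact ih _ _

-- recursive characterisation of A's first loop as a two-counter scan WITH the skip: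
-- on a hanging closer the following character is passed through unprocessed
def loopS : List Char → Nat → Nat → List Char × Nat × Nat
  | [], po, pb => ([], po, pb)
  | c :: cs, po, pb =>
    if c = '(' then let r := loopS cs (po + 1) pb; (c :: r.1, r.2)
    else if c = '[' then let r := loopS cs po (pb + 1); (c :: r.1, r.2)
    else if c = ')' then
      if po > 0 then let r := loopS cs (po - 1) pb; (c :: r.1, r.2)
      else
        match cs with
        | [] => ([], po, pb)
        | d :: cs' => let r := loopS cs' po pb; (d :: r.1, r.2)
    else if c = ']' then
      if pb > 0 then let r := loopS cs po (pb - 1); (c :: r.1, r.2)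
      else
        match cs with
        | [] => ([], po, pb)
        | d :: cs' => let r := loopS cs' po pb; (d :: r.1, r.2)
    else let r := loopS cs po pb; (c :: r.1, r.2)

-- recursive characterisation of B's first loop (no skip)
def loopC : List Char → Nat → Nat → List Char × Nat × Nat
  | [], po, pb => ([], po, pb)
  | c :: cs, po, pb =>
    if c = '(' then let r := loopC cs (po + 1) pb; (c :: r.1, r.2)
    else if c = '[' then let r := loopC cs po (pb + 1); (c :: r.1, r.2)
    else if c = ')' then
      if po > 0 then let r := loopC cs (po - 1) pb; (c :: r.1, r.2)
      else loopC cs po pb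
    else if c = ']' then
      if pb > 0 then let r := loopC cs po (pb - 1); (c :: r.1, r.2)
      else loopC cs po pb
    else let r := loopC cs po pb; (c :: r.1, r.2)

-- recursive rendering of B's second pass
def strip2 : List Char → Nat → Nat → List Char
  | [], _, _ => []
  | c :: cs, po, pb =>
    if c = '(' ∧ po > 0 then strip2 cs (po - 1) pb
    else if c = '[' ∧ pb > 0 then strip2 cs po (pb - 1)
    else c :: strip2 cs po pb

-- remove the first n occurrences of c
def strip1 (c : Char) : Nat → List Char → List Char
  | _, [] => []
  | n, x :: xs => if x = c ∧ n > 0 then strip1 c (n - 1) xs else x :: strip1 c n xs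

lemma pyRemove_eq_erase (t : List Char) (c : Char) : pyRemove t c = t.erase c := by
  by_cases h : c ∈ t
  · rw [pyRemove, PySem.List.remove?_eq_some_erase t c h]; rfl
  · rw [pyRemove, (PySem.List.remove?_eq_none_iff t c).mpr h, List.erase_of_not_mem h]; rfl

lemma strip1_zero (c : Char) (t : List Char) : strip1 c 0 t = t := by
  induction t with
  | nil => rfl
  | cons x xs ih => simp [strip1, ih]

lemma strip1_succ (c : Char) (n : Nat) (t : List Char) :
    strip1 c (n + 1) t = strip1 c n (t.erase c) := by
  induction t generalizing n with
  | nil => rfl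
  | cons x xs ih =>
    by_cases hx : x = c
    · subst hx; simp [strip1, List.erase_cons_head]
    · have hbeq : ¬(x == c) = true := by simp [hx]
      rw [List.erase_cons_tail hbeq]
      have hc1 : ¬(x = c ∧ n + 1 > 0) := fun ⟨h, _⟩ => hx h
      have hc2 : ¬(x = c ∧ n > 0) := fun ⟨h, _⟩ => hx h
      rw [strip1, if_neg hc1, strip1, if_neg hc2, ih]

lemma strip1_erase_comm (c d : Char) (hcd : c ≠ d) (n : Nat) (t : List Char) :
    strip1 c n (t.erase d) = (strip1 c n t).erase d := by
  induction t generalizing n with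
  | nil => rfl
  | cons x xs ih =>
    by_cases hx : x = d
    · subst hx
      have hxc : ¬(x = c ∧ n > 0) := fun ⟨h, _⟩ => hcd (h ▸ rfl)
      simp [strip1, hxc, List.erase_cons_head]
    · have hbeq : ¬(x == d) = true := by simp [hx]
      rw [List.erase_cons_tail hbeq]
      by_cases hxc : x = c ∧ n > 0
      · obtain ⟨h1, h2⟩ := hxc; subst h1
        have hcn : (x = x ∧ n > 0) := ⟨rfl, h2⟩
        rw [strip1, if_pos hcn, strip1, if_pos hcn, ih]
      · rw [strip1, if_neg hxc, strip1, if_neg hxc, List.erase_cons_tail hbeq, ih]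

lemma foldl_pyRemove (q : List Char) : ∀ t : List Char,
    (∀ x ∈ q, x = '(' ∨ x = '[') →
    q.foldl pyRemove t = strip1 '[' (q.count '[') (strip1 '(' (q.count '(') t) := by
  induction q with
  | nil => intro t _; simp [strip1_zero]
  | cons c q' ih =>
    intro t hq
    have hq' : ∀ x ∈ q', x = '(' ∨ x = '[' := fun x hx => hq x (List.mem_cons_of_mem _ hx)
    rcases hq c (List.mem_cons_self) with hc | hc <;> subst hc
    · rw [List.foldl_cons, pyRemove_eq_erase, ih _ hq']
      simp [strip1_succ]
    · rw [List.foldl_cons, pyRemove_eq_erase, ih _ hq']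
      simp only [List.count_cons]
      rw [strip1_erase_comm '(' '[' (by decide), ← strip1_succ]
      simp

lemma strip2_eq (t : List Char) : ∀ po pb,
    strip2 t po pb = strip1 '[' pb (strip1 '(' po t) := by
  induction t with
  | nil => intro po pb; rfl
  | cons c cs ih =>
    intro po pb
    by_cases h1 : c = '(' ∧ po > 0
    · obtain ⟨h1c, h1p⟩ := h1; subst h1c
      have h2 : ¬(('(' : Char) = '[' ∧ pb > 0) := fun ⟨h, _⟩ => by simp at h
      rw [strip2, if_pos ⟨rfl, h1p⟩, strip1, if_pos ⟨rfl, h1p⟩, ih]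
    · by_cases h2 : c = '[' ∧ pb > 0
      · obtain ⟨h2c, h2p⟩ := h2; subst h2c
        rw [strip2, if_neg h1, if_pos ⟨rfl, h2p⟩, strip1, if_neg h1, strip1,
          if_pos ⟨rfl, h2p⟩, ih]
      · rw [strip2, if_neg h1, if_neg h2, strip1, if_neg h1, strip1, if_neg h2, ih]

lemma foldl_stepStrip (t : List Char) : ∀ po pb out,
    t.foldl stepStrip (po, pb, out) =
      ((t.foldl stepStrip (po, pb, out)).1, (t.foldl stepStrip (po, pb, out)).2.1,
        out ++ strip2 t po pb) := by
  induction t with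
  | nil => intro po pb out; simp [strip2]
  | cons c cs ih =>
    intro po pb out
    rw [List.foldl_cons]
    by_cases h1 : c = '(' ∧ po > 0
    · rw [show stepStrip (po, pb, out) c = (po - 1, pb, out) by simp [stepStrip, if_pos h1],
        strip2, if_pos h1]
      exact ih _ _ _
    · by_cases h2 : c = '[' ∧ pb > 0
      · rw [show stepStrip (po, pb, out) c = (po, pb - 1, out) by
          simp [stepStrip, if_neg h1, if_pos h2], strip2, if_neg h1, if_pos h2]
        exact ih _ _ _
      · rw [show stepStrip (po, pb, out) c = (po, pb, out ++ [c]) by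
          simp [stepStrip, if_neg h1, if_neg h2], strip2, if_neg h1, if_neg h2]
        rw [ih]
        simp

-- Source B's first foldl computes loopC (counters and kept list)
lemma foldl_stepB (cs : List Char) : ∀ po pb kept,
    cs.foldl stepB (po, pb, kept) =
      ((loopC cs po pb).2.1, (loopC cs po pb).2.2, kept ++ (loopC cs po pb).1) := by
  induction cs with
  | nil => intro po pb kept; simp [loopC]
  | cons c cs' ih =>
    intro po pb kept
    rw [List.foldl_cons]
    by_cases h1 : c = '('
    · subst h1
      rw [show stepB (po, pb, kept) '(' = (po + 1, pb, kept ++ ['(']) by simp [stepB],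
        loopC.eq_def]
      simp only [reduceIte]
      rw [ih]
      simp
    · by_cases h2 : c = '['
      · subst h2
        rw [show stepB (po, pb, kept) '[' = (po, pb + 1, kept ++ ['[']) by simp [stepB],
          loopC.eq_def]
        simp only [reduceIte]
        rw [ih]
        simp
      · by_cases h3 : c = ')'
        · subst h3
          rw [loopC.eq_def]
          simp only [reduceIte]
          by_cases hpo : po > 0
          · rw [show stepB (po, pb, kept) ')' = (po - 1, pb, kept ++ [')']) by
              simp [stepB]; omega, if_pos hpo, ih]
            simp
          · have hz : po = 0 := by omega
            rw [show stepB (po, pb, kept) ')' = (po, pb, kept) by simp [stepB, hz],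
              if_neg hpo, ih]
            simp
        · by_cases h4 : c = ']'
          · subst h4
            rw [loopC.eq_def]
            simp only [reduceIte]
            by_cases hpb : pb > 0
            · rw [show stepB (po, pb, kept) ']' = (po, pb - 1, kept ++ [']']) by
                simp [stepB]; omega, if_pos hpb, ih]
              simp
            · have hz : pb = 0 := by omega
              rw [show stepB (po, pb, kept) ']' = (po, pb, kept) by simp [stepB, hz],
                if_neg hpb, ih]
              simp
          · rw [show stepB (po, pb, kept) c = (po, pb, kept ++ [c]) by
              simp [stepB, h1, h2, h3, h4], loopC.eq_def]
            simp only [h1, h2, h3, h4, reduceIte]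
            rw [ih]
            simp

-- where no hanging closer is immediately followed by a bracket, the skip never
-- touches a bracket and the two scans coincide
lemma loopS_eq_loopC (n : Nat) : ∀ cs : List Char, cs.length ≤ n → ∀ po pb,
    hasBadAux cs po pb = false → loopS cs po pb = loopC cs po pb := by
  induction n with
  | zero =>
    intro cs h po pb _
    have : cs = [] := List.eq_nil_of_length_eq_zero (by omega)
    subst this; rfl
  | succ n ih =>
    intro cs hlen po pb hbad
    match cs with
    | [] => rfl
    | c :: cs' =>
      have hlen' : cs'.length ≤ n := by simp at hlen; omega
      by_cases h1 : c = '('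
      · subst h1
        rw [hasBadAux] at hbad
        simp only [Char.reduceEq, reduceIte] at hbad
        rw [loopS.eq_def, loopC.eq_def]
        simp only [Char.reduceEq, reduceIte]
        rw [ih cs' hlen' _ _ hbad]
      · by_cases h2 : c = '['
        · subst h2
          rw [hasBadAux] at hbad
          simp only [Char.reduceEq, reduceIte] at hbad
          rw [loopS.eq_def, loopC.eq_def]
          simp only [Char.reduceEq, reduceIte]
          rw [ih cs' hlen' _ _ hbad]
        · by_cases h3 : c = ')'
          · subst h3
            rw [hasBadAux] at hbad
            simp only [Char.reduceEq, reduceIte] at hbad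
            rw [loopS.eq_def, loopC.eq_def]
            simp only [Char.reduceEq, reduceIte]
            by_cases hpo : po > 0
            · rw [if_pos hpo] at hbad
              rw [if_pos hpo, if_pos hpo, ih cs' hlen' _ _ hbad]
            · rw [if_neg hpo] at hbad
              rw [if_neg hpo, if_neg hpo]
              simp only [Bool.or_eq_false_iff] at hbad
              obtain ⟨hd0, hbad'⟩ := hbad
              match cs' , hd0, hbad', hlen' with
              | [], _, _, _ => rfl
              | d :: cs'', hd0, hbad', hlen' =>
                simp only [List.head?_cons, Option.any_some, isBr, List.mem_cons,
                  List.not_mem_nil, or_false,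
                  decide_eq_false_iff_not, not_or] at hd0
                obtain ⟨hd3, hd4, hd1, hd2⟩ := hd0
                have hlen'' : cs''.length ≤ n := by simp at hlen'; omega
                rw [hasBadAux] at hbad'
                simp only [hd1, hd2, hd3, hd4, reduceIte] at hbad'
                rw [loopC.eq_def]
                simp only [hd1, hd2, hd3, hd4, reduceIte]
                rw [ih cs'' hlen'' _ _ hbad']
          · by_cases h4 : c = ']'
            · subst h4
              rw [hasBadAux] at hbad
              simp only [Char.reduceEq, reduceIte] at hbad
              rw [loopS.eq_def, loopC.eq_def]
              simp only [Char.reduceEq, reduceIte]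
              by_cases hpb : pb > 0
              · rw [if_pos hpb] at hbad
                rw [if_pos hpb, if_pos hpb, ih cs' hlen' _ _ hbad]
              · rw [if_neg hpb] at hbad
                rw [if_neg hpb, if_neg hpb]
                simp only [Bool.or_eq_false_iff] at hbad
                obtain ⟨hd0, hbad'⟩ := hbad
                match cs' , hd0, hbad', hlen' with
                | [], _, _, _ => rfl
                | d :: cs'', hd0, hbad', hlen' =>
                  simp only [List.head?_cons, Option.any_some, isBr, List.mem_cons,
                    List.not_mem_nil, or_false,
                    decide_eq_false_iff_not, not_or] at hd0
                  obtain ⟨hd3, hd4, hd1, hd2⟩ := hd0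
                  have hlen'' : cs''.length ≤ n := by simp at hlen'; omega
                  rw [hasBadAux] at hbad'
                  simp only [hd1, hd2, hd3, hd4, reduceIte] at hbad'
                  rw [loopC.eq_def]
                  simp only [hd1, hd2, hd3, hd4, reduceIte]
                  rw [ih cs'' hlen'' _ _ hbad']
            · rw [hasBadAux] at hbad
              simp only [h1, h2, h3, h4, reduceIte] at hbad
              rw [loopS.eq_def, loopC.eq_def]
              simp only [h1, h2, h3, h4, reduceIte]
              rw [ih cs' hlen' _ _ hbad]

lemma getElem_append_cons (pre : List Char) (c : Char) (cs : List Char) :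
    (pre ++ c :: cs)[pre.length]'(by simp) = c := by
  induction pre with
  | nil => rfl
  | cons x p ih => simp [ih]

lemma eraseIdx_append_cons (pre : List Char) (c : Char) (cs : List Char) :
    (pre ++ c :: cs).eraseIdx pre.length = pre ++ cs := by
  induction pre with
  | nil => rfl
  | cons x p ih => simpa [List.eraseIdx] using ih

lemma loopA_eq (n : Nat) : ∀ cs : List Char, cs.length ≤ n → ∀ pre q,
    (∀ x ∈ q, x = '(' ∨ x = '[') →
    ∃ q', loopA (pre ++ cs) pre.length q
            = (pre ++ (loopS cs (q.count '(') (q.count '[')).1, q')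
        ∧ (∀ x ∈ q', x = '(' ∨ x = '[')
        ∧ q'.count '(' = (loopS cs (q.count '(') (q.count '[')).2.1
        ∧ q'.count '[' = (loopS cs (q.count '(') (q.count '[')).2.2 := by
  induction n with
  | zero =>
    intro cs h pre q hq
    have : cs = [] := List.eq_nil_of_length_eq_zero (by omega)
    subst this
    refine ⟨q, ?_, hq, by simp [loopS], by simp [loopS]⟩
    rw [loopA]
    simp [loopS]
  | succ n ih =>
    intro cs hlen pre q hq
    match cs with
    | [] =>
      refine ⟨q, ?_, hq, by simp [loopS], by simp [loopS]⟩
      rw [loopA]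
      simp [loopS]
    | c :: cs' =>
      have hlen' : cs'.length ≤ n := by simp at hlen; omega
      have hlt : pre.length < (pre ++ c :: cs').length := by simp
      rw [loopA, dif_pos hlt]
      simp only [getElem_append_cons]
      by_cases h1 : c = '('
      · subst h1
        rw [if_pos (Or.inl rfl)]
        have e1 : pre.length + 1 = (pre ++ ['(']).length := by simp
        have e2 : pre ++ '(' :: cs' = (pre ++ ['(']) ++ cs' := by simp
        rw [e1, e2]
        obtain ⟨q', he, hq', hc1, hc2⟩ := ih cs' hlen' (pre ++ ['(']) (q ++ ['('])
          (by intro x hx; rcases List.mem_append.mp hx with h | h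
              · exact hq x h
              · simp at h; subst h; exact Or.inl rfl)
        have ea : (q ++ ['(']).count '(' = q.count '(' + 1 := by simp
        have eb : (q ++ ['(']).count '[' = q.count '[' := by simp
        rw [ea, eb] at he hc1 hc2
        have eB : loopS ('(' :: cs') (q.count '(') (q.count '[')
            = ('(' :: (loopS cs' (q.count '(' + 1) (q.count '[')).1,
                (loopS cs' (q.count '(' + 1) (q.count '[')).2) := by
          rw [loopS.eq_def]; rfl
        rw [eB]
        exact ⟨q', by simpa using he, hq', hc1, hc2⟩
      · by_cases h2 : c = '['
        · subst h2
          rw [if_pos (Or.inr rfl)]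
          have e1 : pre.length + 1 = (pre ++ ['[']).length := by simp
          have e2 : pre ++ '[' :: cs' = (pre ++ ['[']) ++ cs' := by simp
          rw [e1, e2]
          obtain ⟨q', he, hq', hc1, hc2⟩ := ih cs' hlen' (pre ++ ['[']) (q ++ ['['])
            (by intro x hx; rcases List.mem_append.mp hx with h | h
                · exact hq x h
                · simp at h; subst h; exact Or.inr rfl)
          have ea : (q ++ ['[']).count '(' = q.count '(' := by simp
          have eb : (q ++ ['[']).count '[' = q.count '[' + 1 := by simp
          rw [ea, eb] at he hc1 hc2
          have eB : loopS ('[' :: cs') (q.count '(') (q.count '[')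
              = ('[' :: (loopS cs' (q.count '(') (q.count '[' + 1)).1,
                  (loopS cs' (q.count '(') (q.count '[' + 1)).2) := by
            rw [loopS.eq_def]; rfl
          rw [eB]
          exact ⟨q', by simpa using he, hq', hc1, hc2⟩
        · by_cases h3 : c = ')'
          · subst h3
            rw [if_neg (by decide)]
            rw [if_pos rfl]
            have eB : loopS (')' :: cs') (q.count '(') (q.count '[')
                = if q.count '(' > 0 then
                    (')' :: (loopS cs' (q.count '(' - 1) (q.count '[')).1,
                      (loopS cs' (q.count '(' - 1) (q.count '[')).2)
                  else
                    match cs' with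
                    | [] => ([], q.count '(', q.count '[')
                    | d :: cs'' =>
                      (d :: (loopS cs'' (q.count '(') (q.count '[')).1,
                        (loopS cs'' (q.count '(') (q.count '[')).2) := by
              rw [loopS.eq_def]
              simp only [reduceIte]
              split_ifs with h
              · rfl
              · match cs' with
                | [] => rfl
                | d :: cs'' => rfl
            by_cases hmem : '(' ∈ q
            · have hpos : q.count '(' > 0 := List.count_pos_iff.mpr hmem
              rw [if_pos hmem]
              have hrm : pyRemove q '(' = q.erase '(' := pyRemove_eq_erase q '('
              have e1 : pre.length + 1 = (pre ++ [')']).length := by simp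
              have e2 : pre ++ ')' :: cs' = (pre ++ [')']) ++ cs' := by simp
              rw [hrm, e1, e2]
              obtain ⟨q', he, hq', hc1, hc2⟩ := ih cs' hlen' (pre ++ [')']) (q.erase '(')
                (fun x hx => hq x (List.mem_of_mem_erase hx))
              have ec1 : (q.erase '(').count '(' = q.count '(' - 1 := List.count_erase_self
              have ec2 : (q.erase '(').count '[' = q.count '[' := by
                exact List.count_erase_of_ne (by decide)
              rw [ec1, ec2] at he hc1 hc2
              rw [eB, if_pos hpos]
              exact ⟨q', by simpa using he, hq', hc1, hc2⟩
            · have hpos : ¬ q.count '(' > 0 := by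
                simpa [List.count_pos_iff] using hmem
              rw [if_neg hmem, eraseIdx_append_cons, eB, if_neg hpos]
              match cs' with
              | [] =>
                refine ⟨q, ?_, hq, rfl, rfl⟩
                rw [loopA]
                simp
              | d :: cs'' =>
                have hlen'' : cs''.length ≤ n := by simp at hlen'; omega
                have e1 : pre.length + 1 = (pre ++ [d]).length := by simp
                have e2 : pre ++ d :: cs'' = (pre ++ [d]) ++ cs'' := by simp
                rw [e1, e2]
                obtain ⟨q', he, hq', hc1, hc2⟩ := ih cs'' hlen'' (pre ++ [d]) q hq
                exact ⟨q', by simpa using he, hq', hc1, hc2⟩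
          · by_cases h4 : c = ']'
            · subst h4
              rw [if_neg (by decide)]
              rw [if_neg (by decide), if_pos rfl]
              have eB : loopS (']' :: cs') (q.count '(') (q.count '[')
                  = if q.count '[' > 0 then
                      (']' :: (loopS cs' (q.count '(') (q.count '[' - 1)).1,
                        (loopS cs' (q.count '(') (q.count '[' - 1)).2)
                    else
                      match cs' with
                      | [] => ([], q.count '(', q.count '[')
                      | d :: cs'' =>
                        (d :: (loopS cs'' (q.count '(') (q.count '[')).1,
                          (loopS cs'' (q.count '(') (q.count '[')).2) := by
                rw [loopS.eq_def]
                simp only [reduceIte]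
                split_ifs with h
                · rfl
                · match cs' with
                  | [] => rfl
                  | d :: cs'' => rfl
              by_cases hmem : '[' ∈ q
              · have hpos : q.count '[' > 0 := List.count_pos_iff.mpr hmem
                rw [if_pos hmem]
                have hrm : pyRemove q '[' = q.erase '[' := pyRemove_eq_erase q '['
                have e1 : pre.length + 1 = (pre ++ [']']).length := by simp
                have e2 : pre ++ ']' :: cs' = (pre ++ [']']) ++ cs' := by simp
                rw [hrm, e1, e2]
                obtain ⟨q', he, hq', hc1, hc2⟩ := ih cs' hlen' (pre ++ [']']) (q.erase '[')
                  (fun x hx => hq x (List.mem_of_mem_erase hx))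
                have ec1 : (q.erase '[').count '[' = q.count '[' - 1 := List.count_erase_self
                have ec2 : (q.erase '[').count '(' = q.count '(' := by
                  exact List.count_erase_of_ne (by decide)
                rw [ec1, ec2] at he hc1 hc2
                rw [eB, if_pos hpos]
                exact ⟨q', by simpa using he, hq', hc1, hc2⟩
              · have hpos : ¬ q.count '[' > 0 := by
                  simpa [List.count_pos_iff] using hmem
                rw [if_neg hmem, eraseIdx_append_cons, eB, if_neg hpos]
                match cs' with
                | [] =>
                  refine ⟨q, ?_, hq, rfl, rfl⟩
                  rw [loopA]
                  simp
                | d :: cs'' =>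
                  have hlen'' : cs''.length ≤ n := by simp at hlen'; omega
                  have e1 : pre.length + 1 = (pre ++ [d]).length := by simp
                  have e2 : pre ++ d :: cs'' = (pre ++ [d]) ++ cs'' := by simp
                  rw [e1, e2]
                  obtain ⟨q', he, hq', hc1, hc2⟩ := ih cs'' hlen'' (pre ++ [d]) q hq
                  exact ⟨q', by simpa using he, hq', hc1, hc2⟩
            · rw [if_neg (by simp [h1, h2]), if_neg h3, if_neg h4]
              have eB : loopS (c :: cs') (q.count '(') (q.count '[')
                  = (c :: (loopS cs' (q.count '(') (q.count '[')).1,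
                      (loopS cs' (q.count '(') (q.count '[')).2) := by
                rw [loopS.eq_def]
                simp [h1, h2, h3, h4]
              have e1 : pre.length + 1 = (pre ++ [c]).length := by simp
              have e2 : pre ++ c :: cs' = (pre ++ [c]) ++ cs' := by simp
              rw [e1, e2, eB]
              obtain ⟨q', he, hq', hc1, hc2⟩ := ih cs' hlen' (pre ++ [c]) q hq
              exact ⟨q', by simpa using he, hq', hc1, hc2⟩

-- ===== VERDICT (by name: the statement is the Claim_ definition above) =====
theorem bracket_balancer_spec : Claim_unchanged_bracket_balancer := by
  intro smi _
  unfold Spec_bracket_balancer bracket_balancer bracket_balancer_alt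
  intro hnd
  have hbad : hasBadAux smi.toList 0 0 = false := by
    unfold D_bracket_balancer at hnd
    rw [hasBadAux_eq]
    exact Bool.eq_false_iff.mpr (fun h => hnd h)
  simp only []
  obtain ⟨q', he, hq', hc1, hc2⟩ :=
    loopA_eq smi.toList.length smi.toList le_rfl [] [] (by simp)
  simp only [List.nil_append, List.length_nil, List.count_nil] at he hc1 hc2
  rw [he]
  rw [foldl_pyRemove q' _ hq', hc1, hc2]
  rw [loopS_eq_loopC smi.toList.length smi.toList le_rfl 0 0 hbad]
  rw [foldl_stepB]
  rw [foldl_stepStrip]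
  simp [strip2_eq]

theorem bracket_balancer_changed : Claim_changed_bracket_balancer := by
  unfold Claim_changed_bracket_balancer pvDiffWitness_bracket_balancer pvDiffWitnessOut_bracket_balancer
  refine ⟨by decide, by decide, ?_, by decide, by decide⟩
  show bracket_balancer ")(" = "("
  have h : (")(" : String).toList = [')', '('] := by decide
  rw [bracket_balancer]
  rw [h]
  rw [loopA]
  simp only [List.length_cons, List.length_nil]
  norm_num
  rw [loopA]
  simp only [Char.reduceEq]
  norm_num
  rw [loopA]
  norm_num [pyRemove, PySem.List.remove?]
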